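-- pv_equiv track=rewrite | github.com/RobRodGobe/AdventOfCode2024 | python/AoC_2024.py | compute_quadrant_multiplier
-- ===== SOURCE A (Python) =====
-- from typing import List, Dict, Optional, Tuple, Set
--
-- def compute_quadrant_multiplier(final_positions: List[List[int]], width: int, height: int) -> int:
--     mid_x, mid_y = width // 2, height // 2
--
--     top_left = top_right = bottom_left = bottom_right = 0
--
--     for x in range(width):
--         for y in range(height):
--             if x == mid_x or y == mid_y:
--                 continue
--
--             if x < mid_x and y < mid_y:
--                 top_left += final_positions[x][y]
--             elif x >= mid_x and y < mid_y:
--                 top_right += final_positions[x][y]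
--             elif x < mid_x and y >= mid_y:
--                 bottom_left += final_positions[x][y]
--             elif x >= mid_x and y >= mid_y:
--                 bottom_right += final_positions[x][y]
--
--     return top_left * top_right * bottom_left * bottom_right
-- ===== SOURCE B (Python) =====
-- def compute_quadrant_multiplier(final_positions, width, height):
--     mid_x, mid_y = width // 2, height // 2
--     top_left = sum(final_positions[x][y]
--                    for x in range(mid_x) for y in range(mid_y))
--     top_right = sum(final_positions[x][y]
--                     for x in range(mid_x + 1, width) for y in range(mid_y))
--     bottom_left = sum(final_positions[x][y]
--                       for x in range(mid_x) for y in range(mid_y + 1, height))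
--     bottom_right = sum(final_positions[x][y]
--                        for x in range(mid_x + 1, width) for y in range(mid_y + 1, height))
--     return top_left * top_right * bottom_left * bottom_right
-- ===== Notes on version B (the rewrite author's own statement) =====
-- stated objective: simpler
-- what changed: Replaces the single width-by-height scan that classifies every cell (skipping the median row/column with a continue and an elif chain) by four independent region sums over explicit disjoint index ranges whose bounds exclude the medians by construction.
import Mathlib
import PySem

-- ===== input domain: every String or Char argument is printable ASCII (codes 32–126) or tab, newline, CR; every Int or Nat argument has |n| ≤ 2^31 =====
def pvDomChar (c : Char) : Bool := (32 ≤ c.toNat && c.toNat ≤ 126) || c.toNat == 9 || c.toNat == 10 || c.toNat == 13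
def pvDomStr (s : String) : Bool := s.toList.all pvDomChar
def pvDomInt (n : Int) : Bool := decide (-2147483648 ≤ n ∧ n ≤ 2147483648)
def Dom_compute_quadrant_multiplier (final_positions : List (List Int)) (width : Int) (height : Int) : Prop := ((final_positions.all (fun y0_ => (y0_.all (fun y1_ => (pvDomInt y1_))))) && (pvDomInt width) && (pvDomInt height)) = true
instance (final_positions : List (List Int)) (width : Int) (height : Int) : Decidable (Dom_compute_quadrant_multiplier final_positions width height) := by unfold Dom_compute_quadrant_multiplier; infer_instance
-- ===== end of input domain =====

-- B computes the four quadrant totals as independent sums over explicit disjoint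
-- ranges instead of A's single classifying scan with a continue; same cost, simpler.

-- ===== PORT A =====
def compute_quadrant_multiplier (final_positions : List (List Int)) (width : Int) (height : Int) : Int :=
  let mid_x := PySem.Int.floordiv width 2
  let mid_y := PySem.Int.floordiv height 2
  let r := (PySem.List.pyRange 0 width 1).foldl (fun (s : Int × Int × Int × Int) x =>
      (PySem.List.pyRange 0 height 1).foldl (fun (s : Int × Int × Int × Int) y =>
        if x = mid_x ∨ y = mid_y then s
        else if x < mid_x ∧ y < mid_y then
          (s.1 + PySem.List.pyGetD (PySem.List.pyGetD final_positions x []) y 0, s.2.1, s.2.2.1, s.2.2.2)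
        else if mid_x ≤ x ∧ y < mid_y then
          (s.1, s.2.1 + PySem.List.pyGetD (PySem.List.pyGetD final_positions x []) y 0, s.2.2.1, s.2.2.2)
        else if x < mid_x ∧ mid_y ≤ y then
          (s.1, s.2.1, s.2.2.1 + PySem.List.pyGetD (PySem.List.pyGetD final_positions x []) y 0, s.2.2.2)
        else if mid_x ≤ x ∧ mid_y ≤ y then
          (s.1, s.2.1, s.2.2.1, s.2.2.2 + PySem.List.pyGetD (PySem.List.pyGetD final_positions x []) y 0)
        else s) s)
    ((0 : Int), (0 : Int), (0 : Int), (0 : Int))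
  r.1 * r.2.1 * r.2.2.1 * r.2.2.2

-- ===== PORT B =====
def compute_quadrant_multiplier_alt (final_positions : List (List Int)) (width : Int) (height : Int) : Int :=
  let mid_x := PySem.Int.floordiv width 2
  let mid_y := PySem.Int.floordiv height 2
  let top_left := ((PySem.List.pyRange 0 mid_x 1).map (fun x =>
      ((PySem.List.pyRange 0 mid_y 1).map (fun y =>
        PySem.List.pyGetD (PySem.List.pyGetD final_positions x []) y 0)).sum)).sum
  let top_right := ((PySem.List.pyRange (mid_x + 1) width 1).map (fun x =>
      ((PySem.List.pyRange 0 mid_y 1).map (fun y =>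
        PySem.List.pyGetD (PySem.List.pyGetD final_positions x []) y 0)).sum)).sum
  let bottom_left := ((PySem.List.pyRange 0 mid_x 1).map (fun x =>
      ((PySem.List.pyRange (mid_y + 1) height 1).map (fun y =>
        PySem.List.pyGetD (PySem.List.pyGetD final_positions x []) y 0)).sum)).sum
  let bottom_right := ((PySem.List.pyRange (mid_x + 1) width 1).map (fun x =>
      ((PySem.List.pyRange (mid_y + 1) height 1).map (fun y =>
        PySem.List.pyGetD (PySem.List.pyGetD final_positions x []) y 0)).sum)).sum
  top_left * top_right * bottom_left * bottom_right

-- ===== PRECONDITION & SPEC =====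
-- Pre_ excludes exactly the inputs on which A's indexing raises IndexError:
-- every visited non-median cell (x, y) needs row x to exist with entry y
-- (vacuous when height <= 1, since then every y hits the median row).
def Pre_compute_quadrant_multiplier (final_positions : List (List Int)) (width : Int) (height : Int) : Prop :=
  2 ≤ width → 2 ≤ height →
    (width ≤ (final_positions.length : Int) ∨
      (width = (final_positions.length : Int) + 1 ∧
        PySem.Int.floordiv width 2 = (final_positions.length : Int))) ∧
    ∀ p ∈ final_positions.zipIdx, (p.2 : Int) < width →
      (p.2 : Int) ≠ PySem.Int.floordiv width 2 →
      (height ≤ (p.1.length : Int) ∨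
        (height = (p.1.length : Int) + 1 ∧
          PySem.Int.floordiv height 2 = (p.1.length : Int)))
instance (final_positions : List (List Int)) (width : Int) (height : Int) : Decidable (Pre_compute_quadrant_multiplier final_positions width height) := by unfold Pre_compute_quadrant_multiplier; infer_instance

def pvWitness_compute_quadrant_multiplier : List (List Int) × Int × Int :=
  ([[1, 2, 3], [4, 5, 6], [7, 8, 9]], 3, 3)

def Spec_compute_quadrant_multiplier (final_positions : List (List Int)) (width : Int) (height : Int) (out : Int) : Prop := out = compute_quadrant_multiplier_alt final_positions width height
instance (final_positions : List (List Int)) (width : Int) (height : Int) (out : Int) : Decidable (Spec_compute_quadrant_multiplier final_positions width height out) := by unfold Spec_compute_quadrant_multiplier; infer_instance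

-- ===== CLAIM (what is proved, stated in full; the proofs are below) =====
def Claim_equal_compute_quadrant_multiplier : Prop := ∀ (final_positions : List (List Int)) (width : Int) (height : Int), Dom_compute_quadrant_multiplier final_positions width height → Pre_compute_quadrant_multiplier final_positions width height → Spec_compute_quadrant_multiplier final_positions width height (compute_quadrant_multiplier final_positions width height)

-- ===== LEMMAS AND PROOFS =====

lemma pv_sum_zero (F : Int → Int) (a b : Int)
    (h : ∀ x, a ≤ x → x < b → F x = 0) :
    ((PySem.List.pyRange a b 1).map F).sum = 0 := by
  apply List.sum_eq_zero
  intro z hz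
  obtain ⟨x, hx, rfl⟩ := List.mem_map.1 hz
  rcases (PySem.List.mem_pyRange_one).1 hx with ⟨h1, h2⟩
  exact h x h1 h2

lemma pv_foldl_add4 (l : List Int) (g1 g2 g3 g4 : Int → Int) :
    ∀ s : Int × Int × Int × Int,
      l.foldl (fun s y => (s.1 + g1 y, s.2.1 + g2 y, s.2.2.1 + g3 y, s.2.2.2 + g4 y)) s
        = (s.1 + (l.map g1).sum, s.2.1 + (l.map g2).sum,
           s.2.2.1 + (l.map g3).sum, s.2.2.2 + (l.map g4).sum) := by
  induction l with
  | nil => intro s; simp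
  | cons a t ih =>
      intro s
      simp only [List.foldl_cons, List.map_cons, List.sum_cons, ih]
      refine Prod.ext ?_ (Prod.ext ?_ (Prod.ext ?_ ?_)) <;> simp <;> ring

lemma pv_fdiv2_bounds (n : Int) :
    (1 ≤ n → 0 ≤ PySem.Int.floordiv n 2 ∧ PySem.Int.floordiv n 2 < n) ∧
    (n ≤ 0 → n ≤ PySem.Int.floordiv n 2 ∧ PySem.Int.floordiv n 2 ≤ 0) := by
  rw [PySem.Int.floordiv_eq_ediv_of_pos (by omega : (0:Int) < 2)]
  omega

lemma pv_split_lower (F : Int → Int) (n : Int)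
    (h0 : ∀ x, PySem.Int.floordiv n 2 ≤ x → F x = 0) :
    ((PySem.List.pyRange 0 n 1).map F).sum
      = ((PySem.List.pyRange 0 (PySem.Int.floordiv n 2) 1).map F).sum := by
  by_cases hn : 1 ≤ n
  · rcases (pv_fdiv2_bounds n).1 hn with ⟨hm0, hmn⟩
    rw [PySem.List.pyRange_one_append 0 (PySem.Int.floordiv n 2) n hm0 (le_of_lt hmn),
        List.map_append, List.sum_append,
        pv_sum_zero F (PySem.Int.floordiv n 2) n (fun x hx _ => h0 x hx), add_zero]
  · rcases (pv_fdiv2_bounds n).2 (by omega) with ⟨-, hm0⟩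
    rw [PySem.List.pyRange_one_eq_nil (by omega), PySem.List.pyRange_one_eq_nil hm0]

lemma pv_split_upper (F : Int → Int) (n : Int)
    (h0 : ∀ x, x ≤ PySem.Int.floordiv n 2 → F x = 0) :
    ((PySem.List.pyRange 0 n 1).map F).sum
      = ((PySem.List.pyRange (PySem.Int.floordiv n 2 + 1) n 1).map F).sum := by
  by_cases hn : 1 ≤ n
  · rcases (pv_fdiv2_bounds n).1 hn with ⟨hm0, hmn⟩
    rw [PySem.List.pyRange_one_append 0 (PySem.Int.floordiv n 2 + 1) n (by omega) (by omega),
        List.map_append, List.sum_append,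
        pv_sum_zero F 0 (PySem.Int.floordiv n 2 + 1) (fun x _ hx => h0 x (by omega)), zero_add]
  · rcases (pv_fdiv2_bounds n).2 (by omega) with ⟨hnm, -⟩
    rw [PySem.List.pyRange_one_eq_nil (by omega), PySem.List.pyRange_one_eq_nil (by omega)]

lemma pv_inner_lower (c : Int → Int) (h : Int) :
    ((PySem.List.pyRange 0 h 1).map (fun y =>
        if y = PySem.Int.floordiv h 2 then 0
        else if y < PySem.Int.floordiv h 2 then c y else 0)).sum
      = ((PySem.List.pyRange 0 (PySem.Int.floordiv h 2) 1).map c).sum := by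
  rw [pv_split_lower _ h (by intro y hy; split_ifs with h1 h2 <;> first | rfl | omega)]
  apply congrArg
  apply List.map_congr_left
  intro y hy
  rcases (PySem.List.mem_pyRange_one).1 hy with ⟨h1, h2⟩
  rw [if_neg (by omega), if_pos h2]

lemma pv_inner_upper (c : Int → Int) (h : Int) :
    ((PySem.List.pyRange 0 h 1).map (fun y =>
        if y = PySem.Int.floordiv h 2 then 0
        else if y < PySem.Int.floordiv h 2 then 0 else c y)).sum
      = ((PySem.List.pyRange (PySem.Int.floordiv h 2 + 1) h 1).map c).sum := by
  rw [pv_split_upper _ h (by intro y hy; split_ifs with h1 h2 <;> first | rfl | omega)]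
  apply congrArg
  apply List.map_congr_left
  intro y hy
  rcases (PySem.List.mem_pyRange_one).1 hy with ⟨h1, h2⟩
  rw [if_neg (by omega), if_neg (by omega)]

lemma pv_main (fp : List (List Int)) (w h : Int) :
    compute_quadrant_multiplier fp w h = compute_quadrant_multiplier_alt fp w h := by
  unfold compute_quadrant_multiplier compute_quadrant_multiplier_alt
  dsimp only
  rw [show (fun (s : Int × Int × Int × Int) x =>
      (PySem.List.pyRange 0 h 1).foldl (fun (s : Int × Int × Int × Int) y =>
        if x = PySem.Int.floordiv w 2 ∨ y = PySem.Int.floordiv h 2 then s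
        else if x < PySem.Int.floordiv w 2 ∧ y < PySem.Int.floordiv h 2 then
          (s.1 + PySem.List.pyGetD (PySem.List.pyGetD fp x []) y 0, s.2.1, s.2.2.1, s.2.2.2)
        else if PySem.Int.floordiv w 2 ≤ x ∧ y < PySem.Int.floordiv h 2 then
          (s.1, s.2.1 + PySem.List.pyGetD (PySem.List.pyGetD fp x []) y 0, s.2.2.1, s.2.2.2)
        else if x < PySem.Int.floordiv w 2 ∧ PySem.Int.floordiv h 2 ≤ y then
          (s.1, s.2.1, s.2.2.1 + PySem.List.pyGetD (PySem.List.pyGetD fp x []) y 0, s.2.2.2)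
        else if PySem.Int.floordiv w 2 ≤ x ∧ PySem.Int.floordiv h 2 ≤ y then
          (s.1, s.2.1, s.2.2.1, s.2.2.2 + PySem.List.pyGetD (PySem.List.pyGetD fp x []) y 0)
        else s) s)
    = (fun (s : Int × Int × Int × Int) x =>
        (s.1 + ((PySem.List.pyRange 0 h 1).map (fun y =>
            if x = PySem.Int.floordiv w 2 ∨ y = PySem.Int.floordiv h 2 then 0
            else if x < PySem.Int.floordiv w 2 ∧ y < PySem.Int.floordiv h 2 then
              PySem.List.pyGetD (PySem.List.pyGetD fp x []) y 0 else 0)).sum,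
         s.2.1 + ((PySem.List.pyRange 0 h 1).map (fun y =>
            if x = PySem.Int.floordiv w 2 ∨ y = PySem.Int.floordiv h 2 then 0
            else if x < PySem.Int.floordiv w 2 ∧ y < PySem.Int.floordiv h 2 then 0
            else if PySem.Int.floordiv w 2 ≤ x ∧ y < PySem.Int.floordiv h 2 then
              PySem.List.pyGetD (PySem.List.pyGetD fp x []) y 0 else 0)).sum,
         s.2.2.1 + ((PySem.List.pyRange 0 h 1).map (fun y =>
            if x = PySem.Int.floordiv w 2 ∨ y = PySem.Int.floordiv h 2 then 0
            else if x < PySem.Int.floordiv w 2 ∧ y < PySem.Int.floordiv h 2 then 0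
            else if PySem.Int.floordiv w 2 ≤ x ∧ y < PySem.Int.floordiv h 2 then 0
            else if x < PySem.Int.floordiv w 2 ∧ PySem.Int.floordiv h 2 ≤ y then
              PySem.List.pyGetD (PySem.List.pyGetD fp x []) y 0 else 0)).sum,
         s.2.2.2 + ((PySem.List.pyRange 0 h 1).map (fun y =>
            if x = PySem.Int.floordiv w 2 ∨ y = PySem.Int.floordiv h 2 then 0
            else if x < PySem.Int.floordiv w 2 ∧ y < PySem.Int.floordiv h 2 then 0
            else if PySem.Int.floordiv w 2 ≤ x ∧ y < PySem.Int.floordiv h 2 then 0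
            else if x < PySem.Int.floordiv w 2 ∧ PySem.Int.floordiv h 2 ≤ y then 0
            else if PySem.Int.floordiv w 2 ≤ x ∧ PySem.Int.floordiv h 2 ≤ y then
              PySem.List.pyGetD (PySem.List.pyGetD fp x []) y 0 else 0)).sum)) from by
      funext s x
      rw [show (fun (s : Int × Int × Int × Int) y =>
          if x = PySem.Int.floordiv w 2 ∨ y = PySem.Int.floordiv h 2 then s
          else if x < PySem.Int.floordiv w 2 ∧ y < PySem.Int.floordiv h 2 then
            (s.1 + PySem.List.pyGetD (PySem.List.pyGetD fp x []) y 0, s.2.1, s.2.2.1, s.2.2.2)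
          else if PySem.Int.floordiv w 2 ≤ x ∧ y < PySem.Int.floordiv h 2 then
            (s.1, s.2.1 + PySem.List.pyGetD (PySem.List.pyGetD fp x []) y 0, s.2.2.1, s.2.2.2)
          else if x < PySem.Int.floordiv w 2 ∧ PySem.Int.floordiv h 2 ≤ y then
            (s.1, s.2.1, s.2.2.1 + PySem.List.pyGetD (PySem.List.pyGetD fp x []) y 0, s.2.2.2)
          else if PySem.Int.floordiv w 2 ≤ x ∧ PySem.Int.floordiv h 2 ≤ y then
            (s.1, s.2.1, s.2.2.1, s.2.2.2 + PySem.List.pyGetD (PySem.List.pyGetD fp x []) y 0)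
          else s)
        = (fun (s : Int × Int × Int × Int) y =>
          (s.1 + (if x = PySem.Int.floordiv w 2 ∨ y = PySem.Int.floordiv h 2 then 0
            else if x < PySem.Int.floordiv w 2 ∧ y < PySem.Int.floordiv h 2 then
              PySem.List.pyGetD (PySem.List.pyGetD fp x []) y 0 else 0),
           s.2.1 + (if x = PySem.Int.floordiv w 2 ∨ y = PySem.Int.floordiv h 2 then 0
            else if x < PySem.Int.floordiv w 2 ∧ y < PySem.Int.floordiv h 2 then 0
            else if PySem.Int.floordiv w 2 ≤ x ∧ y < PySem.Int.floordiv h 2 then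
              PySem.List.pyGetD (PySem.List.pyGetD fp x []) y 0 else 0),
           s.2.2.1 + (if x = PySem.Int.floordiv w 2 ∨ y = PySem.Int.floordiv h 2 then 0
            else if x < PySem.Int.floordiv w 2 ∧ y < PySem.Int.floordiv h 2 then 0
            else if PySem.Int.floordiv w 2 ≤ x ∧ y < PySem.Int.floordiv h 2 then 0
            else if x < PySem.Int.floordiv w 2 ∧ PySem.Int.floordiv h 2 ≤ y then
              PySem.List.pyGetD (PySem.List.pyGetD fp x []) y 0 else 0),
           s.2.2.2 + (if x = PySem.Int.floordiv w 2 ∨ y = PySem.Int.floordiv h 2 then 0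
            else if x < PySem.Int.floordiv w 2 ∧ y < PySem.Int.floordiv h 2 then 0
            else if PySem.Int.floordiv w 2 ≤ x ∧ y < PySem.Int.floordiv h 2 then 0
            else if x < PySem.Int.floordiv w 2 ∧ PySem.Int.floordiv h 2 ≤ y then 0
            else if PySem.Int.floordiv w 2 ≤ x ∧ PySem.Int.floordiv h 2 ≤ y then
              PySem.List.pyGetD (PySem.List.pyGetD fp x []) y 0 else 0))) from by
        funext s y; split_ifs <;> simp]
      exact pv_foldl_add4 _ _ _ _ _ s]
  rw [pv_foldl_add4 (PySem.List.pyRange 0 w 1) _ _ _ _ ((0:Int), (0:Int), (0:Int), (0:Int))]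
  dsimp only
  simp only [zero_add]
  have e1 : ((PySem.List.pyRange 0 w 1).map (fun x =>
      ((PySem.List.pyRange 0 h 1).map (fun y =>
        if x = PySem.Int.floordiv w 2 ∨ y = PySem.Int.floordiv h 2 then 0
        else if x < PySem.Int.floordiv w 2 ∧ y < PySem.Int.floordiv h 2 then
          PySem.List.pyGetD (PySem.List.pyGetD fp x []) y 0 else 0)).sum)).sum
      = ((PySem.List.pyRange 0 (PySem.Int.floordiv w 2) 1).map (fun x =>
          ((PySem.List.pyRange 0 (PySem.Int.floordiv h 2) 1).map (fun y =>
            PySem.List.pyGetD (PySem.List.pyGetD fp x []) y 0)).sum)).sum := by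
    rw [pv_split_lower _ w (fun x hx => pv_sum_zero _ 0 h
      (fun y hy1 hy2 => by split_ifs <;> first | rfl | (exfalso; omega)))]
    refine congrArg _ (List.map_congr_left ?_)
    intro x hx
    rcases (PySem.List.mem_pyRange_one).1 hx with ⟨hx1, hx2⟩
    rw [show (fun y => if x = PySem.Int.floordiv w 2 ∨ y = PySem.Int.floordiv h 2 then 0
        else if x < PySem.Int.floordiv w 2 ∧ y < PySem.Int.floordiv h 2 then
          PySem.List.pyGetD (PySem.List.pyGetD fp x []) y 0 else (0:Int))
      = (fun y => if y = PySem.Int.floordiv h 2 then 0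
        else if y < PySem.Int.floordiv h 2 then
          PySem.List.pyGetD (PySem.List.pyGetD fp x []) y 0 else 0) from
      funext fun y => by split_ifs <;> first | rfl | (exfalso; omega)]
    exact pv_inner_lower _ h
  have e2 : ((PySem.List.pyRange 0 w 1).map (fun x =>
      ((PySem.List.pyRange 0 h 1).map (fun y =>
        if x = PySem.Int.floordiv w 2 ∨ y = PySem.Int.floordiv h 2 then 0
        else if x < PySem.Int.floordiv w 2 ∧ y < PySem.Int.floordiv h 2 then 0
        else if PySem.Int.floordiv w 2 ≤ x ∧ y < PySem.Int.floordiv h 2 then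
          PySem.List.pyGetD (PySem.List.pyGetD fp x []) y 0 else 0)).sum)).sum
      = ((PySem.List.pyRange (PySem.Int.floordiv w 2 + 1) w 1).map (fun x =>
          ((PySem.List.pyRange 0 (PySem.Int.floordiv h 2) 1).map (fun y =>
            PySem.List.pyGetD (PySem.List.pyGetD fp x []) y 0)).sum)).sum := by
    rw [pv_split_upper _ w (fun x hx => pv_sum_zero _ 0 h
      (fun y hy1 hy2 => by split_ifs <;> first | rfl | (exfalso; omega)))]
    refine congrArg _ (List.map_congr_left ?_)
    intro x hx
    rcases (PySem.List.mem_pyRange_one).1 hx with ⟨hx1, hx2⟩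
    rw [show (fun y => if x = PySem.Int.floordiv w 2 ∨ y = PySem.Int.floordiv h 2 then 0
        else if x < PySem.Int.floordiv w 2 ∧ y < PySem.Int.floordiv h 2 then 0
        else if PySem.Int.floordiv w 2 ≤ x ∧ y < PySem.Int.floordiv h 2 then
          PySem.List.pyGetD (PySem.List.pyGetD fp x []) y 0 else (0:Int))
      = (fun y => if y = PySem.Int.floordiv h 2 then 0
        else if y < PySem.Int.floordiv h 2 then
          PySem.List.pyGetD (PySem.List.pyGetD fp x []) y 0 else 0) from
      funext fun y => by split_ifs <;> first | rfl | (exfalso; omega)]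
    exact pv_inner_lower _ h
  have e3 : ((PySem.List.pyRange 0 w 1).map (fun x =>
      ((PySem.List.pyRange 0 h 1).map (fun y =>
        if x = PySem.Int.floordiv w 2 ∨ y = PySem.Int.floordiv h 2 then 0
        else if x < PySem.Int.floordiv w 2 ∧ y < PySem.Int.floordiv h 2 then 0
        else if PySem.Int.floordiv w 2 ≤ x ∧ y < PySem.Int.floordiv h 2 then 0
        else if x < PySem.Int.floordiv w 2 ∧ PySem.Int.floordiv h 2 ≤ y then
          PySem.List.pyGetD (PySem.List.pyGetD fp x []) y 0 else 0)).sum)).sum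
      = ((PySem.List.pyRange 0 (PySem.Int.floordiv w 2) 1).map (fun x =>
          ((PySem.List.pyRange (PySem.Int.floordiv h 2 + 1) h 1).map (fun y =>
            PySem.List.pyGetD (PySem.List.pyGetD fp x []) y 0)).sum)).sum := by
    rw [pv_split_lower _ w (fun x hx => pv_sum_zero _ 0 h
      (fun y hy1 hy2 => by split_ifs <;> first | rfl | (exfalso; omega)))]
    refine congrArg _ (List.map_congr_left ?_)
    intro x hx
    rcases (PySem.List.mem_pyRange_one).1 hx with ⟨hx1, hx2⟩
    rw [show (fun y => if x = PySem.Int.floordiv w 2 ∨ y = PySem.Int.floordiv h 2 then 0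
        else if x < PySem.Int.floordiv w 2 ∧ y < PySem.Int.floordiv h 2 then 0
        else if PySem.Int.floordiv w 2 ≤ x ∧ y < PySem.Int.floordiv h 2 then 0
        else if x < PySem.Int.floordiv w 2 ∧ PySem.Int.floordiv h 2 ≤ y then
          PySem.List.pyGetD (PySem.List.pyGetD fp x []) y 0 else (0:Int))
      = (fun y => if y = PySem.Int.floordiv h 2 then 0
        else if y < PySem.Int.floordiv h 2 then 0 else
          PySem.List.pyGetD (PySem.List.pyGetD fp x []) y 0) from
      funext fun y => by split_ifs <;> first | rfl | (exfalso; omega)]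
    exact pv_inner_upper _ h
  have e4 : ((PySem.List.pyRange 0 w 1).map (fun x =>
      ((PySem.List.pyRange 0 h 1).map (fun y =>
        if x = PySem.Int.floordiv w 2 ∨ y = PySem.Int.floordiv h 2 then 0
        else if x < PySem.Int.floordiv w 2 ∧ y < PySem.Int.floordiv h 2 then 0
        else if PySem.Int.floordiv w 2 ≤ x ∧ y < PySem.Int.floordiv h 2 then 0
        else if x < PySem.Int.floordiv w 2 ∧ PySem.Int.floordiv h 2 ≤ y then 0
        else if PySem.Int.floordiv w 2 ≤ x ∧ PySem.Int.floordiv h 2 ≤ y then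
          PySem.List.pyGetD (PySem.List.pyGetD fp x []) y 0 else 0)).sum)).sum
      = ((PySem.List.pyRange (PySem.Int.floordiv w 2 + 1) w 1).map (fun x =>
          ((PySem.List.pyRange (PySem.Int.floordiv h 2 + 1) h 1).map (fun y =>
            PySem.List.pyGetD (PySem.List.pyGetD fp x []) y 0)).sum)).sum := by
    rw [pv_split_upper _ w (fun x hx => pv_sum_zero _ 0 h
      (fun y hy1 hy2 => by split_ifs <;> first | rfl | (exfalso; omega)))]
    refine congrArg _ (List.map_congr_left ?_)
    intro x hx
    rcases (PySem.List.mem_pyRange_one).1 hx with ⟨hx1, hx2⟩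
    rw [show (fun y => if x = PySem.Int.floordiv w 2 ∨ y = PySem.Int.floordiv h 2 then 0
        else if x < PySem.Int.floordiv w 2 ∧ y < PySem.Int.floordiv h 2 then 0
        else if PySem.Int.floordiv w 2 ≤ x ∧ y < PySem.Int.floordiv h 2 then 0
        else if x < PySem.Int.floordiv w 2 ∧ PySem.Int.floordiv h 2 ≤ y then 0
        else if PySem.Int.floordiv w 2 ≤ x ∧ PySem.Int.floordiv h 2 ≤ y then
          PySem.List.pyGetD (PySem.List.pyGetD fp x []) y 0 else (0:Int))
      = (fun y => if y = PySem.Int.floordiv h 2 then 0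
        else if y < PySem.Int.floordiv h 2 then 0 else
          PySem.List.pyGetD (PySem.List.pyGetD fp x []) y 0) from
      funext fun y => by split_ifs <;> first | rfl | (exfalso; omega)]
    exact pv_inner_upper _ h
  rw [e1, e2, e3, e4]

-- ===== VERDICT (by name: the statement is the Claim_ definition above) =====
theorem compute_quadrant_multiplier_spec : Claim_equal_compute_quadrant_multiplier := by
  intro fp w h _ _
  unfold Spec_compute_quadrant_multiplier
  exact pv_main fp w h
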